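-- pv_equiv track=rewrite | github.com/greenlight2000/InspectCoder | inspectcoder.py | _sanitize_traceback
-- ===== SOURCE A (Python) =====
-- def _sanitize_traceback(traceback_text):
--     if traceback_text == "" or traceback_text == None:
--         return traceback_text
--     traceback_text = traceback_text.replace("_inner_call_method", "test_with_mock_input").replace("wrapped_function", "solution")
--     transformed = traceback_text.replace('File "<string>"', 'File "__test__.py"')
--
--     lines = transformed.split('\n')
--     test_file_line_index = -1
--
--     for i, line in enumerate(lines):
--         if 'File "__test__.py"' in line:
--             test_file_line_index = i
--             break
--
--     if test_file_line_index != -1: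
--         transformed_lines = lines[test_file_line_index:]
--         transformed_lines.insert(0, "Traceback (most recent call last):")
--         transformed = '\n'.join(transformed_lines)
--
--     return transformed
-- ===== SOURCE B (Python) =====
-- def _sanitize_traceback(traceback_text):
--     if traceback_text == "" or traceback_text is None:
--         return traceback_text
--     traceback_text = traceback_text.replace("_inner_call_method", "test_with_mock_input").replace("wrapped_function", "solution")
--     transformed = traceback_text.replace('File "<string>"', 'File "__test__.py"')
--
--     # Stream through the text one line at a time, keeping the current suffix;
--     # no list of lines is ever built and no join is needed.
--     rest = transformed
--     while True:
--         head, sep, tail = rest.partition('\n')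
--         if 'File "__test__.py"' in head:
--             return "Traceback (most recent call last):\n" + rest
--         if not sep:
--             return transformed
--         rest = tail
-- ===== Notes on version B (the rewrite author's own statement) =====
-- stated objective: simpler
-- what changed: A splits the text into a list of lines, searches it with an enumerated index, slices, inserts a header and re-joins; B streams through the text partitioning off one line at a time and, at the first line containing the marker, returns the header plus the remaining suffix directly, building no list and joining nothing.
import Mathlib
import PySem

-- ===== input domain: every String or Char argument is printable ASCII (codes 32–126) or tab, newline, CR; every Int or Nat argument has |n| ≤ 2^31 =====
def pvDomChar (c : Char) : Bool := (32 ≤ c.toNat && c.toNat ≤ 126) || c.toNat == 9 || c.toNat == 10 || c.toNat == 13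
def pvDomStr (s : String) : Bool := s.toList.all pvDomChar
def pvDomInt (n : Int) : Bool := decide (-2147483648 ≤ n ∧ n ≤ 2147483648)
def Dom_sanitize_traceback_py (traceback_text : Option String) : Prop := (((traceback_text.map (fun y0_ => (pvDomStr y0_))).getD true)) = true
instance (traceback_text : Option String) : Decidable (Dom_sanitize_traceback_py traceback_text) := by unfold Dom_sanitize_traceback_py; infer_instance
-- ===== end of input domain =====

-- B replaces A's split-into-lines / indexed search / slice / insert / join pipeline by a single
-- streaming pass that partitions off one line at a time and returns the remaining suffix directly
-- (objective: simpler — no line list is built and no join is needed).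

-- ===== PORT A =====
-- the 'for i, line in enumerate(lines): if marker in line: …; break' search (i supplied by enumerate)
def pvAFind (lines : List String) (i : Int) : Int :=
  match lines with
  | [] => -1
  | line :: rest =>
    if PySem.Str.isIn "File \"__test__.py\"" line then i else pvAFind rest (i + 1)

def sanitize_traceback_py (traceback_text : Option String) : Option String :=
  match traceback_text with
  | none => none                                   -- traceback_text == None
  | some s =>
    if s = "" then some s                          -- traceback_text == ""
    else
      let s1 := PySem.Str.replace (PySem.Str.replace s "_inner_call_method" "test_with_mock_input") "wrapped_function" "solution"
      let transformed := PySem.Str.replace s1 "File \"<string>\"" "File \"__test__.py\""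
      let lines := (PySem.Str.split? transformed "\n").getD []   -- sep "\n" nonempty: split always returns some
      let idx := pvAFind lines 0
      if idx ≠ -1 then
        some (PySem.Str.join "\n" (PySem.List.insert (PySem.List.slice lines (some idx) none) 0 "Traceback (most recent call last):"))
      else some transformed

-- ===== PORT B =====
-- rest.partition('\n') ported by hand over List Char (PySem has no partition): exact — first
-- component is the text before the first '\n', the Bool says whether a '\n' was found, third is the tail.
def pvPartitionNL : List Char → List Char × Bool × List Char
  | [] => ([], false, [])
  | c :: r =>
    if c = '\n' then ([], true, r)
    else
      let p := pvPartitionNL r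
      (c :: p.1, p.2.1, p.2.2)

-- termination of B's loop: the tail after a found '\n' is strictly shorter
theorem pvPartitionNL_tail_lt (s : List Char) (h : (pvPartitionNL s).2.1 = true) :
    (pvPartitionNL s).2.2.length < s.length := by
  induction s with
  | nil => simp [pvPartitionNL] at h
  | cons c r ih =>
    by_cases hc : c = '\n'
    · simp [pvPartitionNL, hc]
    · simp only [pvPartitionNL, if_neg hc] at h ⊢
      exact Nat.lt_succ_of_lt (ih h)

-- the 'while True' loop of B: returns the suffix starting at the first line containing the marker
def pvBGo (rest : List Char) : Option (List Char) :=
  let p := pvPartitionNL rest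
  if PySem.Chars.isIn "File \"__test__.py\"".toList p.1 then some rest
  else if _hsep : p.2.1 = false then none
  else pvBGo p.2.2
termination_by rest.length
decreasing_by
  exact pvPartitionNL_tail_lt _ (Bool.ne_false_iff.mp _hsep)

def sanitize_traceback_py_alt (traceback_text : Option String) : Option String :=
  match traceback_text with
  | none => none
  | some s =>
    if s = "" then some s
    else
      let s1 := PySem.Str.replace (PySem.Str.replace s "_inner_call_method" "test_with_mock_input") "wrapped_function" "solution"
      let transformed := PySem.Str.replace s1 "File \"<string>\"" "File \"__test__.py\""
      match pvBGo transformed.toList with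
      | some rest => some ("Traceback (most recent call last):\n" ++ String.ofList rest)
      | none => some transformed

-- ===== PRECONDITION & SPEC =====
def Spec_sanitize_traceback_py (traceback_text : Option String) (out : Option String) : Prop := out = sanitize_traceback_py_alt traceback_text
instance (traceback_text : Option String) (out : Option String) : Decidable (Spec_sanitize_traceback_py traceback_text out) := by unfold Spec_sanitize_traceback_py; infer_instance

-- ===== CLAIM (what is proved, stated in full; the proofs are below) =====
def Claim_equal_sanitize_traceback_py : Prop := ∀ (traceback_text : Option String), Dom_sanitize_traceback_py traceback_text → Spec_sanitize_traceback_py traceback_text (sanitize_traceback_py traceback_text)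

-- ===== LEMMAS AND PROOFS =====

-- proof-side view of splitting at '\n': (first line, remaining lines)
def pvMsplit : List Char → List Char × List (List Char)
  | [] => ([], [])
  | c :: r =>
    if c = '\n' then ([], (pvMsplit r).1 :: (pvMsplit r).2)
    else (c :: (pvMsplit r).1, (pvMsplit r).2)

-- Chars-level copy of pvAFind
def pvCFind (L : List (List Char)) (i : Int) : Int :=
  match L with
  | [] => -1
  | l :: rest =>
    if PySem.Chars.isIn "File \"__test__.py\"".toList l then i else pvCFind rest (i + 1)

theorem pvSplitOn_go_eq (l : List Char) : ∀ (fuel : Nat) (cur : List Char) (acc : List (List Char)),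
    l.length ≤ fuel →
    PySem.Chars.splitOn.go ['\n'] fuel l cur acc
      = acc.reverse ++ (cur.reverse ++ (pvMsplit l).1) :: (pvMsplit l).2 := by
  induction l with
  | nil =>
    intro fuel cur acc _
    cases fuel <;> simp [PySem.Chars.splitOn.go, pvMsplit]
  | cons c r ih =>
    intro fuel cur acc hf
    cases fuel with
    | zero => simp at hf
    | succ f =>
      by_cases hc : c = '\n'
      · subst hc
        rw [PySem.Chars.splitOn.go]
        simp only [List.isPrefixOf, List.length_cons] at *
        rw [if_pos (by simp)]
        have hdrop : List.drop (([] : List Char).length + 1) ('\n' :: r) = r := by simp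
        rw [hdrop]
        rw [ih f [] (cur.reverse :: acc) (by omega)]
        simp [pvMsplit]
      · rw [PySem.Chars.splitOn.go]
        rw [if_neg (by simp [List.isPrefixOf]; exact fun h => hc h.symm)]
        rw [ih f (c :: cur) acc (by simpa using Nat.le_of_succ_le_succ hf)]
        simp [pvMsplit, hc]

theorem pvSplitOn_eq (s : List Char) :
    PySem.Chars.splitOn s ['\n'] = (pvMsplit s).1 :: (pvMsplit s).2 := by
  have := pvSplitOn_go_eq s (s.length + 1) [] [] (by omega)
  simpa [PySem.Chars.splitOn] using this

theorem pvJoin_msplit (s : List Char) :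
    PySem.Chars.join ['\n'] ((pvMsplit s).1 :: (pvMsplit s).2) = s := by
  induction s with
  | nil => simp [pvMsplit, PySem.Chars.join_singleton]
  | cons c r ih =>
    by_cases hc : c = '\n'
    · subst hc
      rw [show pvMsplit ('\n' :: r) = ([], (pvMsplit r).1 :: (pvMsplit r).2) from by simp [pvMsplit]]
      rw [PySem.Chars.join_cons_cons]
      simp [ih]
    · simp only [pvMsplit, if_neg hc]
      cases h2 : (pvMsplit r).2 with
      | nil =>
        rw [h2] at ih
        rw [PySem.Chars.join_singleton] at ih ⊢
        simp [ih]
      | cons q qs =>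
        rw [h2] at ih
        rw [PySem.Chars.join_cons_cons] at ih ⊢
        simp only [List.cons_append, List.append_assoc] at ih ⊢
        rw [ih]

theorem pvPartition_head (s : List Char) : (pvPartitionNL s).1 = (pvMsplit s).1 := by
  induction s with
  | nil => rfl
  | cons c r ih =>
    by_cases hc : c = '\n' <;> simp [pvPartitionNL, pvMsplit, hc, ih]

theorem pvPartition_nosep (s : List Char) (h : (pvPartitionNL s).2.1 = false) :
    pvMsplit s = (s, []) := by
  induction s with
  | nil => rfl
  | cons c r ih =>
    by_cases hc : c = '\n'
    · simp [pvPartitionNL, hc] at h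
    · simp only [pvPartitionNL, if_neg hc] at h
      simp [pvMsplit, hc, ih h]

theorem pvPartition_sep (s : List Char) (h : (pvPartitionNL s).2.1 = true) :
    (pvMsplit s).2 = (pvMsplit (pvPartitionNL s).2.2).1 :: (pvMsplit (pvPartitionNL s).2.2).2 := by
  induction s with
  | nil => simp [pvPartitionNL] at h
  | cons c r ih =>
    by_cases hc : c = '\n'
    · simp [pvPartitionNL, pvMsplit, hc]
    · simp only [pvPartitionNL, if_neg hc] at h ⊢
      simpa [pvMsplit, hc] using ih h

theorem pvCFind_ge (L : List (List Char)) (i : Int) :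
    pvCFind L i = -1 ∨ i ≤ pvCFind L i := by
  induction L generalizing i with
  | nil => left; rfl
  | cons l rest ih =>
    by_cases hl : PySem.Chars.isIn "File \"__test__.py\"".toList l
    · right; simp only [pvCFind, if_pos hl]
      exact le_refl i
    · simp only [pvCFind, if_neg hl]
      rcases ih (i + 1) with h | h
      · left; exact h
      · right; omega

theorem pvCFind_shift (L : List (List Char)) (i : Int) :
    pvCFind L i = if pvCFind L 0 = -1 then -1 else i + pvCFind L 0 := by
  induction L generalizing i with
  | nil => simp [pvCFind]
  | cons l rest ih =>
    by_cases hl : PySem.Chars.isIn "File \"__test__.py\"".toList l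
    · simp only [pvCFind, if_pos hl]
      simp
    · simp only [pvCFind, if_neg hl]
      rw [ih (i + 1), ih (0 + 1)]
      rcases pvCFind_ge rest 0 with h | h <;> split_ifs <;> omega

theorem pvCFind_lt (L : List (List Char)) (i : Int) (h : pvCFind L i ≠ -1) :
    pvCFind L i < i + L.length := by
  induction L generalizing i with
  | nil => simp [pvCFind] at h
  | cons l rest ih =>
    by_cases hl : PySem.Chars.isIn "File \"__test__.py\"".toList l
    · simp only [pvCFind, if_pos hl] at *
      simp only [List.length_cons]; push_cast; omega
    · simp only [pvCFind, if_neg hl] at h ⊢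
      have := ih (i + 1) h
      simp; omega

-- the core: B's streaming loop computes exactly A's "find line index, drop, join" result
theorem pvBGo_eq_aux (n : Nat) : ∀ (s : List Char), s.length ≤ n →
    pvBGo s = (if pvCFind ((pvMsplit s).1 :: (pvMsplit s).2) 0 = -1 then none
               else some (PySem.Chars.join ['\n']
                 (List.drop (pvCFind ((pvMsplit s).1 :: (pvMsplit s).2) 0).toNat
                   ((pvMsplit s).1 :: (pvMsplit s).2)))) := by
  induction n with
  | zero =>
    intro s hs
    have hs0 : s = [] := List.eq_nil_of_length_eq_zero (Nat.le_zero.mp hs)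
    subst hs0
    rw [pvBGo]
    decide
  | succ m ih =>
    intro s hs
    rw [pvBGo]
    by_cases hin : PySem.Chars.isIn "File \"__test__.py\"".toList (pvPartitionNL s).1 = true
    · rw [if_pos hin]
      rw [pvPartition_head] at hin
      simp only [pvCFind, if_pos hin]
      rw [if_neg (by norm_num)]
      simp [pvJoin_msplit]
    · rw [if_neg hin]
      rw [pvPartition_head] at hin
      simp only [pvCFind, if_neg hin]
      by_cases hsep : (pvPartitionNL s).2.1 = false
      · rw [dif_pos hsep]
        have hms := pvPartition_nosep s hsep
        rw [hms]
        simp [pvCFind]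
      · rw [dif_neg hsep]
        have hsep' : (pvPartitionNL s).2.1 = true := Bool.ne_false_iff.mp hsep
        have htl := pvPartitionNL_tail_lt s hsep'
        have hM := pvPartition_sep s hsep'
        set tl := (pvPartitionNL s).2.2 with htldef
        rw [ih tl (by omega)]
        rw [hM]
        rw [pvCFind_shift _ (0 + 1)]
        set k := pvCFind ((pvMsplit tl).1 :: (pvMsplit tl).2) 0 with hk
        by_cases hkn : k = -1
        · simp [hkn]
        · have hk0 : 0 ≤ k := by
            rcases pvCFind_ge ((pvMsplit tl).1 :: (pvMsplit tl).2) 0 with h | h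
            · exact absurd h hkn
            · exact h
          rw [if_neg hkn, if_neg (by omega), if_neg hkn]
          have : (0 + 1 + k).toNat = k.toNat + 1 := by omega
          rw [this, List.drop_succ_cons]

theorem pvAFind_eq_pvCFind (L : List (List Char)) (i : Int) :
    pvAFind (L.map String.ofList) i = pvCFind L i := by
  induction L generalizing i with
  | nil => rfl
  | cons l rest ih =>
    simp only [List.map_cons, pvAFind, pvCFind, PySem.Str.isIn, String.toList_ofList, ih]

theorem pvInsert0 {α : Type} (xs : List α) (v : α) : PySem.List.insert xs 0 v = v :: xs := by
  simp [PySem.List.insert, PySem.List.sliceIndices]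

-- A's whole post-replace pipeline equals B's loop, for any transformed text T
theorem pvCore (T : String) :
    (let lines := (PySem.Str.split? T "\n").getD []
     let idx := pvAFind lines 0
     if idx ≠ -1 then
       some (PySem.Str.join "\n" (PySem.List.insert (PySem.List.slice lines (some idx) none) 0 "Traceback (most recent call last):"))
     else some T)
    = (match pvBGo T.toList with
       | some rest => some ("Traceback (most recent call last):\n" ++ String.ofList rest)
       | none => some T) := by
  have hnl : ("\n" : String).toList = ['\n'] := by decide
  have hsplit : (PySem.Str.split? T "\n").getD []
      = ((pvMsplit T.toList).1 :: (pvMsplit T.toList).2).map String.ofList := by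
    simp only [PySem.Str.split?, hnl, PySem.Chars.split?]
    rw [if_neg (by decide)]
    simp [pvSplitOn_eq]
  set M := (pvMsplit T.toList).1 :: (pvMsplit T.toList).2 with hMdef
  have hBGo := pvBGo_eq_aux (T.toList.length) T.toList (le_refl _)
  simp only [hsplit, pvAFind_eq_pvCFind]
  by_cases hk : pvCFind M 0 = -1
  · rw [← hMdef] at hBGo
    rw [hBGo, if_pos hk]
    simp [hk]
  · have h0 : 0 ≤ pvCFind M 0 := by
      rcases pvCFind_ge M 0 with h | h
      · exact absurd h hk
      · exact h
    have hlt : (pvCFind M 0).toNat < M.length := by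
      have := pvCFind_lt M 0 hk
      omega
    rw [← hMdef] at hBGo
    rw [hBGo, if_neg hk]
    rw [if_pos hk]
    rw [PySem.List.slice_from _ h0, pvInsert0]
    congr 1
    apply String.toList_inj.mp
    rw [PySem.Str.toList_join, hnl]
    set n := (pvCFind M 0).toNat with hndef
    have hmapdrop : List.map String.toList (List.drop n (M.map String.ofList))
        = List.drop n M := by
      rw [← List.map_drop]
      simp [List.map_map, Function.comp_def]
    simp only [List.map_cons, hmapdrop]
    cases hD : List.drop n M with
    | nil =>
      exfalso
      have := List.length_drop (l := M) (i := n)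
      rw [hD] at this
      simp at this
      omega
    | cons q qs =>
      rw [PySem.Chars.join_cons_cons]
      rw [String.toList_append]
      rw [show (String.ofList (PySem.Chars.join ['\n'] (q :: qs))).toList = PySem.Chars.join ['\n'] (q :: qs) from String.toList_ofList]
      congr 1

-- ===== VERDICT (by name: the statement is the Claim_ definition above) =====
theorem sanitize_traceback_py_spec : Claim_equal_sanitize_traceback_py := by
  intro traceback_text _
  show sanitize_traceback_py traceback_text = sanitize_traceback_py_alt traceback_text
  cases traceback_text with
  | none => rfl
  | some s =>
    by_cases hs : s = ""
    · simp [sanitize_traceback_py, sanitize_traceback_py_alt, hs]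
    · simp only [sanitize_traceback_py, sanitize_traceback_py_alt, if_neg hs]
      exact pvCore _
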